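-- pv_equiv track=rewrite | github.com/Tetramputechture/nclone | nclone/graph/reachability/fast_graph_builder.py | _apply_entity_mask
-- ===== SOURCE A (Python) =====
-- from typing import Dict, Set, Tuple, List, Any, Optional
--
-- CELL_SIZE = 24
--
-- def _apply_entity_mask(
--
--     base_adjacency: Dict,
--     blocked_positions: Set[Tuple[int, int]],
--     blocked_edges: Set[Tuple[Tuple[int, int], Tuple[int, int]]]
-- ) -> Dict:
--     """
--     Apply entity state mask to base adjacency graph.
--
--     Filters out blocked positions and edges based on current entity states.
--     For sub-node system: block all 4 sub-nodes in a blocked tile.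
--     """
--     # Convert blocked tile positions to sub-node pixel positions
--     # Each blocked tile blocks all 4 sub-nodes within it
--     blocked_pixels = set()
--     sub_offsets = [(6, 6), (18, 6), (6, 18), (18, 18)]
--
--     for tile_x, tile_y in blocked_positions:
--         # Block all 4 sub-nodes in this tile
--         for offset_x, offset_y in sub_offsets:
--             pixel_x = tile_x * CELL_SIZE + offset_x
--             pixel_y = tile_y * CELL_SIZE + offset_y
--             blocked_pixels.add((pixel_x, pixel_y))
--
--     # Build filtered adjacency
--     filtered = {}
--
--     for pos, neighbors in base_adjacency.items():
--         # Skip if position itself is blocked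
--         if pos in blocked_pixels:
--             continue
--
--         # Filter neighbors
--         valid_neighbors = []
--         for neighbor_pos, cost in neighbors:
--             # Skip if neighbor is blocked
--             if neighbor_pos in blocked_pixels:
--                 continue
--
--             # Skip if edge is blocked
--             edge = (pos, neighbor_pos)
--             if edge in blocked_edges:
--                 continue
--
--             valid_neighbors.append((neighbor_pos, cost))
--
--         filtered[pos] = valid_neighbors
--
--     return filtered
-- ===== SOURCE B (Python) =====
-- CELL_SIZE = 24
--
-- def _apply_entity_mask(base_adjacency, blocked_positions, blocked_edges):
--     """Subtractive algorithm: copy the graph, then DELETE blocked material from it —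
--     for each blocked tile pop its four sub-node keys and prune neighbor entries that
--     point at them, then prune each blocked edge individually — instead of rebuilding
--     the dict in one filtering pass over a precomputed blocked-pixel set."""
--     filtered = {pos: list(nbrs) for pos, nbrs in base_adjacency.items()}
--
--     for tile_x, tile_y in blocked_positions:
--         for off_x, off_y in ((6, 6), (18, 6), (6, 18), (18, 18)):
--             p = (tile_x * CELL_SIZE + off_x, tile_y * CELL_SIZE + off_y)
--             filtered.pop(p, None)
--             for src in filtered:
--                 filtered[src] = [e for e in filtered[src] if e[0] != p]
--
--     for u, v in blocked_edges:
--         if u in filtered: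
--             filtered[u] = [e for e in filtered[u] if e[0] != v]
--
--     return filtered
-- ===== Notes on version B (the rewrite author's own statement) =====
-- stated objective: alternative
-- what changed: Replaces A's build-by-filtering pass (precompute the blocked-pixel set, rebuild the dict keeping survivors) with a subtractive algorithm: copy the graph, then for each blocked tile pop its four sub-node keys and prune neighbor entries pointing at them, then prune each blocked edge individually; the blocked-pixel set and the per-entry membership tests disappear.
import Mathlib
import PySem

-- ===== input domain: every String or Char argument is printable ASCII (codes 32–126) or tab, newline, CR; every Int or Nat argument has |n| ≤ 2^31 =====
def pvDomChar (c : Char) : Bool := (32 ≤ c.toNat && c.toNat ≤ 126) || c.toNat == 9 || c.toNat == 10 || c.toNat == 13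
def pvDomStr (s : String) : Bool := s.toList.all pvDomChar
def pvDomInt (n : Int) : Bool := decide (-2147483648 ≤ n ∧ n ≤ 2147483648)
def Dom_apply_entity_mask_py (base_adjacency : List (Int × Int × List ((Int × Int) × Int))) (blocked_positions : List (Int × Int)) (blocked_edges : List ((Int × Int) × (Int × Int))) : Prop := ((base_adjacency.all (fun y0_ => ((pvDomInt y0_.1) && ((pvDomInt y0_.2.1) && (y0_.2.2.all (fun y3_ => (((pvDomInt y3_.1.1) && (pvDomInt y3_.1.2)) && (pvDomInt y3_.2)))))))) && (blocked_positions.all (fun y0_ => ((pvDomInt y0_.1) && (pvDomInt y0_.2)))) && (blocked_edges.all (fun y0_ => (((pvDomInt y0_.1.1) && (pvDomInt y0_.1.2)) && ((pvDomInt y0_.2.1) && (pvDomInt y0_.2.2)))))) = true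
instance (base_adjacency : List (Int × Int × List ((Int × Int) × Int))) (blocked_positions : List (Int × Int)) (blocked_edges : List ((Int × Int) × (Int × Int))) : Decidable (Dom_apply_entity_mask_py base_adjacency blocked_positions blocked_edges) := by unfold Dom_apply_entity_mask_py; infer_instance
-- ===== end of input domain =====

-- B replaces A's build-by-filtering pass (precomputed blocked-pixel set) with a
-- subtractive algorithm (copy the graph, then delete blocked nodes/neighbors/edges);
-- objective: alternative (not claimed faster).

-- ===== PORT A =====
def pvDictSet (d : List (Int × Int × List ((Int × Int) × Int))) (k : Int × Int)
    (v : List ((Int × Int) × Int)) : List (Int × Int × List ((Int × Int) × Int)) :=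
  match d with
  | [] => [(k.1, k.2, v)]
  | e :: rest => if (e.1, e.2.1) = k then (e.1, e.2.1, v) :: rest else e :: pvDictSet rest k v

def pvSubOffsets : List (Int × Int) := [(6, 6), (18, 6), (6, 18), (18, 18)]

def apply_entity_mask_py (base_adjacency : List (Int × Int × List ((Int × Int) × Int))) (blocked_positions : List (Int × Int)) (blocked_edges : List ((Int × Int) × (Int × Int))) : List (Int × Int × List ((Int × Int) × Int)) :=
  -- blocked_pixels = set(); for (tile_x, tile_y) in blocked_positions: for offsets: add
  let blocked_pixels : PySem.Set (Int × Int) :=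
    blocked_positions.foldl (fun s t =>
      pvSubOffsets.foldl (fun s o => PySem.Set.add s (t.1 * 24 + o.1, t.2 * 24 + o.2)) s)
      PySem.Set.empty
  -- filtered = {}; for pos, neighbors in base_adjacency.items(): ...
  base_adjacency.foldl (fun filtered e =>
    let pos : Int × Int := (e.1, e.2.1)
    if PySem.Set.contains blocked_pixels pos then filtered
    else
      let valid_neighbors := e.2.2.foldl (fun vs nc =>
        if PySem.Set.contains blocked_pixels nc.1 then vs
        else if blocked_edges.contains (pos, nc.1) then vs
        else vs ++ [nc]) []
      pvDictSet filtered pos valid_neighbors) []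

-- ===== PORT B =====
-- filtered.pop(p, None): drop the (unique) entry with key p
def pvPopKey (fl : List (Int × Int × List ((Int × Int) × Int))) (p : Int × Int) :
    List (Int × Int × List ((Int × Int) × Int)) :=
  match fl with
  | [] => []
  | e :: rest => if (e.1, e.2.1) = p then rest else e :: pvPopKey rest p

-- one blocked sub-node pixel p: pop its key, then prune entries pointing at it
def pvPixelStep (fl : List (Int × Int × List ((Int × Int) × Int))) (p : Int × Int) :
    List (Int × Int × List ((Int × Int) × Int)) :=
  (pvPopKey fl p).map (fun e => (e.1, e.2.1, e.2.2.filter (fun nc => !(nc.1 == p))))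

def apply_entity_mask_py_alt (base_adjacency : List (Int × Int × List ((Int × Int) × Int))) (blocked_positions : List (Int × Int)) (blocked_edges : List ((Int × Int) × (Int × Int))) : List (Int × Int × List ((Int × Int) × Int)) :=
  -- filtered = {pos: list(nbrs) for pos, nbrs in base_adjacency.items()}
  let filtered := base_adjacency.map (fun e => (e.1, e.2.1, e.2.2))
  -- for each blocked tile, delete its four sub-node pixels from the graph
  let filtered := blocked_positions.foldl (fun fl t =>
    pvSubOffsets.foldl (fun fl o => pvPixelStep fl (t.1 * 24 + o.1, t.2 * 24 + o.2)) fl) filtered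
  -- for u, v in blocked_edges: if u in filtered: prune v from u's neighbor list
  blocked_edges.foldl (fun fl ed =>
    if fl.any (fun e => (e.1, e.2.1) == ed.1) then
      fl.map (fun e =>
        if (e.1, e.2.1) == ed.1 then (e.1, e.2.1, e.2.2.filter (fun nc => !(nc.1 == ed.2)))
        else e)
    else fl) filtered

-- ===== PRECONDITION & SPEC =====
-- Pre_ requires the keys of base_adjacency to be pairwise distinct: base_adjacency
-- ports a Python dict, and an association list with duplicate keys encodes no dict,
-- so A never receives such an input (no input on which A returns is excluded).
def Pre_apply_entity_mask_py (base_adjacency : List (Int × Int × List ((Int × Int) × Int))) (blocked_positions : List (Int × Int)) (blocked_edges : List ((Int × Int) × (Int × Int))) : Prop :=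
  (base_adjacency.map (fun e => (e.1, e.2.1))).Nodup
instance (base_adjacency : List (Int × Int × List ((Int × Int) × Int))) (blocked_positions : List (Int × Int)) (blocked_edges : List ((Int × Int) × (Int × Int))) : Decidable (Pre_apply_entity_mask_py base_adjacency blocked_positions blocked_edges) := by unfold Pre_apply_entity_mask_py; infer_instance

def pvWitness_apply_entity_mask_py : (List (Int × Int × List ((Int × Int) × Int))) × (List (Int × Int)) × (List ((Int × Int) × (Int × Int))) :=
  ([(6, 6, [((18, 6), 1), ((6, 18), 2)]), (18, 6, [((6, 6), 1)])], [(0, 1)], [((6, 6), (18, 6))])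

def Spec_apply_entity_mask_py (base_adjacency : List (Int × Int × List ((Int × Int) × Int))) (blocked_positions : List (Int × Int)) (blocked_edges : List ((Int × Int) × (Int × Int))) (out : List (Int × Int × List ((Int × Int) × Int))) : Prop := out = apply_entity_mask_py_alt base_adjacency blocked_positions blocked_edges
instance (base_adjacency : List (Int × Int × List ((Int × Int) × Int))) (blocked_positions : List (Int × Int)) (blocked_edges : List ((Int × Int) × (Int × Int))) (out : List (Int × Int × List ((Int × Int) × Int))) : Decidable (Spec_apply_entity_mask_py base_adjacency blocked_positions blocked_edges out) := by unfold Spec_apply_entity_mask_py; infer_instance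

-- ===== CLAIM (what is proved, stated in full; the proofs are below) =====
def Claim_equal_apply_entity_mask_py : Prop := ∀ (base_adjacency : List (Int × Int × List ((Int × Int) × Int))) (blocked_positions : List (Int × Int)) (blocked_edges : List ((Int × Int) × (Int × Int))), Dom_apply_entity_mask_py base_adjacency blocked_positions blocked_edges → Pre_apply_entity_mask_py base_adjacency blocked_positions blocked_edges → Spec_apply_entity_mask_py base_adjacency blocked_positions blocked_edges (apply_entity_mask_py base_adjacency blocked_positions blocked_edges)

-- ===== LEMMAS AND PROOFS =====

-- the list of all blocked sub-node pixels, in enumeration order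
def pvPixList (bp : List (Int × Int)) : List (Int × Int) :=
  bp.flatMap (fun t => pvSubOffsets.map (fun o => (t.1 * 24 + o.1, t.2 * 24 + o.2)))

-- the common normal form both ports are reduced to
def pvNF (ba : List (Int × Int × List ((Int × Int) × Int))) (bp : List (Int × Int))
    (be : List ((Int × Int) × (Int × Int))) : List (Int × Int × List ((Int × Int) × Int)) :=
  (ba.filter (fun e => !(pvPixList bp).contains (e.1, e.2.1))).map
    (fun e => (e.1, e.2.1, e.2.2.filter (fun nc =>
      !(pvPixList bp).contains nc.1 && !be.contains ((e.1, e.2.1), nc.1))))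

-- ---- B side ----

lemma pvPopKey_eq_filter (fl : List (Int × Int × List ((Int × Int) × Int))) (p : Int × Int)
    (h : (fl.map (fun e => (e.1, e.2.1))).Nodup) :
    pvPopKey fl p = fl.filter (fun e => !((e.1, e.2.1) == p)) := by
  induction fl with
  | nil => rfl
  | cons e rest ih =>
    simp only [List.map_cons, List.nodup_cons] at h
    rw [pvPopKey]
    by_cases he : (e.1, e.2.1) = p
    · rw [if_pos he, List.filter_cons_of_neg (by simp [he])]
      symm
      refine List.filter_eq_self.mpr fun x hx => ?_
      simp only [Bool.not_eq_eq_eq_not, Bool.not_true, beq_eq_false_iff_ne, ne_eq]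
      intro hxp
      exact h.1 (List.mem_map.mpr ⟨x, hx, by rw [hxp, he]⟩)
    · rw [if_neg he, List.filter_cons_of_pos (by simp [he]), ih h.2]

lemma pvPixelStep_eq (fl : List (Int × Int × List ((Int × Int) × Int))) (p : Int × Int)
    (h : (fl.map (fun e => (e.1, e.2.1))).Nodup) :
    pvPixelStep fl p = (fl.filter (fun e => !((e.1, e.2.1) == p))).map
      (fun e => (e.1, e.2.1, e.2.2.filter (fun nc => !(nc.1 == p)))) := by
  unfold pvPixelStep
  rw [pvPopKey_eq_filter fl p h]

lemma pvPixelStep_keys (fl : List (Int × Int × List ((Int × Int) × Int))) (p : Int × Int)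
    (h : (fl.map (fun e => (e.1, e.2.1))).Nodup) :
    ((pvPixelStep fl p).map (fun e => (e.1, e.2.1))).Nodup := by
  rw [pvPixelStep_eq fl p h, List.map_map]
  have : ((fl.filter (fun e => !((e.1, e.2.1) == p))).map
      ((fun e : Int × Int × List ((Int × Int) × Int) => (e.1, e.2.1)) ∘
        (fun e => (e.1, e.2.1, e.2.2.filter (fun nc => !(nc.1 == p)))))) =
      (fl.filter (fun e => !((e.1, e.2.1) == p))).map (fun e => (e.1, e.2.1)) := rfl
  rw [this]
  exact h.sublist (List.Sublist.map _ List.filter_sublist)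

lemma pv_pixfold (P : List (Int × Int)) :
    ∀ fl : List (Int × Int × List ((Int × Int) × Int)),
    (fl.map (fun e => (e.1, e.2.1))).Nodup →
    P.foldl pvPixelStep fl =
      (fl.filter (fun e => !P.contains (e.1, e.2.1))).map
        (fun e => (e.1, e.2.1, e.2.2.filter (fun nc => !P.contains nc.1))) := by
  induction P with
  | nil => intro fl _; simp
  | cons p P' ih =>
    intro fl h
    rw [List.foldl_cons, ih _ (pvPixelStep_keys fl p h), pvPixelStep_eq fl p h,
        List.filter_map, List.map_map]
    have hf : (fl.filter (fun e => !((e.1, e.2.1) == p))).filter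
        ((fun e => !P'.contains (e.1, e.2.1)) ∘
          (fun e => (e.1, e.2.1, e.2.2.filter (fun nc => !(nc.1 == p)))))
        = fl.filter (fun e => !(p :: P').contains (e.1, e.2.1)) := by
      rw [List.filter_filter]
      exact List.filter_congr fun x _ => by
        simp [Bool.not_or, Bool.and_comm, Bool.beq_eq_decide_eq]
    rw [hf]
    refine List.map_congr_left fun x _ => ?_
    simp only [Function.comp]
    rw [List.filter_filter]
    refine congrArg (fun v => (x.1, x.2.1, v)) ?_
    exact List.filter_congr fun nc _ => by
      simp [Bool.not_or, Bool.and_comm, Bool.beq_eq_decide_eq]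

lemma pv_foldl_flat (bp : List (Int × Int)) (x : List (Int × Int × List ((Int × Int) × Int))) :
    bp.foldl (fun fl t =>
        pvSubOffsets.foldl (fun fl o => pvPixelStep fl (t.1 * 24 + o.1, t.2 * 24 + o.2)) fl) x
      = (pvPixList bp).foldl pvPixelStep x := by
  induction bp generalizing x with
  | nil => rfl
  | cons t rest ih =>
    rw [List.foldl_cons, ih,
      show pvPixList (t :: rest)
          = pvSubOffsets.map (fun o => (t.1 * 24 + o.1, t.2 * 24 + o.2)) ++ pvPixList rest by
        rw [pvPixList, pvPixList, List.flatMap_cons],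
      List.foldl_append, List.foldl_map]

lemma pv_edgefold (E : List ((Int × Int) × (Int × Int))) :
    ∀ fl : List (Int × Int × List ((Int × Int) × Int)),
    E.foldl (fun fl ed =>
        if fl.any (fun e => (e.1, e.2.1) == ed.1) then
          fl.map (fun e =>
            if (e.1, e.2.1) == ed.1 then (e.1, e.2.1, e.2.2.filter (fun nc => !(nc.1 == ed.2)))
            else e)
        else fl) fl
      = fl.map (fun e => (e.1, e.2.1, e.2.2.filter (fun nc => !E.contains ((e.1, e.2.1), nc.1)))) := by
  induction E with
  | nil => intro fl; simp
  | cons ed E' ih =>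
    intro fl
    rw [List.foldl_cons]
    have hstep : (if fl.any (fun e => (e.1, e.2.1) == ed.1) then
          fl.map (fun e =>
            if (e.1, e.2.1) == ed.1 then (e.1, e.2.1, e.2.2.filter (fun nc => !(nc.1 == ed.2)))
            else e)
        else fl)
        = fl.map (fun e =>
            if (e.1, e.2.1) == ed.1 then (e.1, e.2.1, e.2.2.filter (fun nc => !(nc.1 == ed.2)))
            else e) := by
      by_cases hg : fl.any (fun e => (e.1, e.2.1) == ed.1)
      · rw [if_pos hg]
      · rw [if_neg hg]
        symm
        have hall : ∀ e ∈ fl, ¬((e.1, e.2.1) == ed.1) = true := by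
          simpa [List.any_eq_true] using hg
        calc fl.map (fun e =>
              if (e.1, e.2.1) == ed.1 then (e.1, e.2.1, e.2.2.filter (fun nc => !(nc.1 == ed.2)))
              else e)
            = fl.map id := List.map_congr_left fun e he => by
                rw [if_neg (by simpa using hall e he)]; rfl
          _ = fl := List.map_id _
    rw [hstep, ih, List.map_map]
    refine List.map_congr_left fun e _ => ?_
    simp only [Function.comp]
    by_cases hk : ((e.1, e.2.1) == ed.1) = true
    · rw [if_pos hk]
      simp only []
      rw [List.filter_filter]
      refine congrArg (fun v => (e.1, e.2.1, v)) ?_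
      refine List.filter_congr fun nc _ => ?_
      have hk' : (e.1, e.2.1) = ed.1 := eq_of_beq hk
      rw [List.contains_cons, hk']
      have hpair : ((ed.1, nc.1) == ed) = (nc.1 == ed.2) := by
        cases ed with
        | mk u v => simp
      rw [hpair, Bool.not_or, Bool.and_comm]
    · rw [if_neg hk]
      refine congrArg (fun v => (e.1, e.2.1, v)) ?_
      refine List.filter_congr fun nc _ => ?_
      have hk' : ¬ (e.1, e.2.1) = ed.1 := by simpa using hk
      simp [Prod.ext_iff, hk']

lemma pv_B_eq (ba : List (Int × Int × List ((Int × Int) × Int))) (bp : List (Int × Int))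
    (be : List ((Int × Int) × (Int × Int)))
    (h : (ba.map (fun e => (e.1, e.2.1))).Nodup) :
    apply_entity_mask_py_alt ba bp be = pvNF ba bp be := by
  simp only [apply_entity_mask_py_alt]
  have hcopy : ba.map (fun e => (e.1, e.2.1, e.2.2)) = ba := by
    simp
  rw [hcopy, pv_foldl_flat, pv_pixfold _ _ h, pv_edgefold, List.map_map, pvNF]
  refine List.map_congr_left fun e _ => ?_
  simp only [Function.comp]
  rw [List.filter_filter]
  refine congrArg (fun v => (e.1, e.2.1, v)) ?_
  exact List.filter_congr fun nc _ => Bool.and_comm _ _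

-- ---- A side ----

lemma pv_mem_blockedFold (bp : List (Int × Int)) (s : PySem.Set (Int × Int)) (p : Int × Int) :
    p ∈ bp.foldl (fun s t =>
        pvSubOffsets.foldl (fun s o => PySem.Set.add s (t.1 * 24 + o.1, t.2 * 24 + o.2)) s) s ↔
      p ∈ s ∨ ∃ t ∈ bp, (p.1 = t.1 * 24 + 6 ∨ p.1 = t.1 * 24 + 18) ∧
                        (p.2 = t.2 * 24 + 6 ∨ p.2 = t.2 * 24 + 18) := by
  induction bp generalizing s with
  | nil => simp
  | cons t rest ih =>
    rw [List.foldl_cons, ih]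
    simp only [pvSubOffsets, List.foldl, PySem.Set.mem_add, List.mem_cons, Prod.ext_iff]
    constructor
    · rintro (((((hs | ha) | hb) | hc) | hd) | ⟨u, hu, hx, hy⟩)
      · exact Or.inl hs
      · exact Or.inr ⟨t, Or.inl ⟨rfl, rfl⟩, Or.inl ha.1, Or.inl ha.2⟩
      · exact Or.inr ⟨t, Or.inl ⟨rfl, rfl⟩, Or.inr hb.1, Or.inl hb.2⟩
      · exact Or.inr ⟨t, Or.inl ⟨rfl, rfl⟩, Or.inl hc.1, Or.inr hc.2⟩
      · exact Or.inr ⟨t, Or.inl ⟨rfl, rfl⟩, Or.inr hd.1, Or.inr hd.2⟩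
      · exact Or.inr ⟨u, Or.inr hu, hx, hy⟩
    · rintro (hs | ⟨u, (⟨h1, h2⟩ | hu), hx, hy⟩)
      · exact Or.inl (Or.inl (Or.inl (Or.inl (Or.inl hs))))
      · rw [h1] at hx; rw [h2] at hy
        rcases hx with hx | hx <;> rcases hy with hy | hy
        · exact Or.inl (Or.inl (Or.inl (Or.inl (Or.inr ⟨hx, hy⟩))))
        · exact Or.inl (Or.inl (Or.inr ⟨hx, hy⟩))
        · exact Or.inl (Or.inl (Or.inl (Or.inr ⟨hx, hy⟩)))
        · exact Or.inl (Or.inr ⟨hx, hy⟩)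
      · exact Or.inr ⟨u, hu, hx, hy⟩

lemma pv_contains_pix (bp : List (Int × Int)) (q : Int × Int) :
    PySem.Set.contains
        (bp.foldl (fun s t =>
          pvSubOffsets.foldl (fun s o => PySem.Set.add s (t.1 * 24 + o.1, t.2 * 24 + o.2)) s)
          PySem.Set.empty) q
      = (pvPixList bp).contains q := by
  rw [Bool.eq_iff_iff, PySem.Set.contains_iff, pv_mem_blockedFold, List.contains_iff_mem]
  simp only [PySem.Set.empty, List.not_mem_nil, false_or, pvPixList, pvSubOffsets,
    List.mem_flatMap, List.mem_map, List.mem_cons, List.not_mem_nil, or_false, Prod.ext_iff]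
  constructor
  · rintro ⟨t, ht, hx, hy⟩
    rcases hx with hx | hx <;> rcases hy with hy | hy
    · exact ⟨t, ht, (6, 6), Or.inl ⟨rfl, rfl⟩, hx.symm, hy.symm⟩
    · exact ⟨t, ht, (6, 18), Or.inr (Or.inr (Or.inl ⟨rfl, rfl⟩)), hx.symm, hy.symm⟩
    · exact ⟨t, ht, (18, 6), Or.inr (Or.inl ⟨rfl, rfl⟩), hx.symm, hy.symm⟩
    · exact ⟨t, ht, (18, 18), Or.inr (Or.inr (Or.inr ⟨rfl, rfl⟩)), hx.symm, hy.symm⟩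
  · rintro ⟨t, ht, o, ho, hx, hy⟩
    rcases ho with ⟨h1, h2⟩ | ⟨h1, h2⟩ | ⟨h1, h2⟩ | ⟨h1, h2⟩
    · exact ⟨t, ht, Or.inl (by rw [← hx, h1]), Or.inl (by rw [← hy, h2])⟩
    · exact ⟨t, ht, Or.inr (by rw [← hx, h1]), Or.inl (by rw [← hy, h2])⟩
    · exact ⟨t, ht, Or.inl (by rw [← hx, h1]), Or.inr (by rw [← hy, h2])⟩
    · exact ⟨t, ht, Or.inr (by rw [← hx, h1]), Or.inr (by rw [← hy, h2])⟩

lemma pv_inner (P : List (Int × Int)) (be : List ((Int × Int) × (Int × Int))) (pos : Int × Int)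
    (l : List ((Int × Int) × Int)) : ∀ acc : List ((Int × Int) × Int),
    l.foldl (fun vs nc =>
        if P.contains nc.1 then vs
        else if be.contains (pos, nc.1) then vs else vs ++ [nc]) acc
      = acc ++ l.filter (fun nc => !P.contains nc.1 && !be.contains (pos, nc.1)) := by
  induction l with
  | nil => intro acc; simp
  | cons nc rest ih =>
    intro acc
    rw [List.foldl_cons]
    by_cases h1 : nc.1 ∈ P
    · rw [if_pos (List.contains_iff_mem.mpr h1), ih, List.filter_cons_of_neg (by simp [h1])]
    · by_cases h2 : (pos, nc.1) ∈ be
      · rw [if_neg (by simp [h1]), if_pos (List.contains_iff_mem.mpr h2), ih,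
          List.filter_cons_of_neg (by simp [h2])]
      · rw [if_neg (by simp [h1]), if_neg (by simp [h2]), ih,
          List.filter_cons_of_pos (by simp [h1, h2])]
        simp

lemma pvDictSet_append (acc : List (Int × Int × List ((Int × Int) × Int))) (k : Int × Int)
    (v : List ((Int × Int) × Int)) (h : ∀ e ∈ acc, (e.1, e.2.1) ≠ k) :
    pvDictSet acc k v = acc ++ [(k.1, k.2, v)] := by
  induction acc with
  | nil => rfl
  | cons e rest ih =>
    rw [pvDictSet, if_neg (h e List.mem_cons_self), List.cons_append,
      ih (fun x hx => h x (List.mem_cons_of_mem e hx))]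

lemma pv_A_outer (blk : Int × Int → Bool)
    (val : Int × Int → List ((Int × Int) × Int) → List ((Int × Int) × Int)) :
    ∀ (ba acc : List (Int × Int × List ((Int × Int) × Int))),
    (ba.map (fun e => (e.1, e.2.1))).Nodup →
    (∀ e ∈ ba, ∀ a ∈ acc, (a.1, a.2.1) ≠ (e.1, e.2.1)) →
    ba.foldl (fun fl e =>
        if blk (e.1, e.2.1) then fl
        else pvDictSet fl (e.1, e.2.1) (val (e.1, e.2.1) e.2.2)) acc
      = acc ++ (ba.filter (fun e => !blk (e.1, e.2.1))).map
          (fun e => (e.1, e.2.1, val (e.1, e.2.1) e.2.2)) := by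
  intro ba
  induction ba with
  | nil => intro acc _ _; simp
  | cons e rest ih =>
    intro acc h hdisj
    simp only [List.map_cons, List.nodup_cons] at h
    rw [List.foldl_cons]
    by_cases hb : blk (e.1, e.2.1)
    · rw [if_pos hb, List.filter_cons_of_neg (by simp [hb]),
        ih acc h.2 (fun x hx a ha => hdisj x (List.mem_cons_of_mem e hx) a ha)]
    · rw [if_neg hb,
        pvDictSet_append acc (e.1, e.2.1) _ (fun a ha => hdisj e List.mem_cons_self a ha),
        List.filter_cons_of_pos (by simp [hb]), List.map_cons]
      rw [ih (acc ++ [(e.1, e.2.1, val (e.1, e.2.1) e.2.2)]) h.2 ?_]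
      · rw [List.append_assoc]; rfl
      · intro x hx a ha
        rcases List.mem_append.mp ha with ha | ha
        · exact hdisj x (List.mem_cons_of_mem e hx) a ha
        · simp only [List.mem_singleton] at ha
          subst ha
          intro hcon
          exact h.1 (List.mem_map.mpr ⟨x, hx, by simpa using hcon.symm⟩)

lemma pv_A_eq (ba : List (Int × Int × List ((Int × Int) × Int))) (bp : List (Int × Int))
    (be : List ((Int × Int) × (Int × Int)))
    (h : (ba.map (fun e => (e.1, e.2.1))).Nodup) :
    apply_entity_mask_py ba bp be = pvNF ba bp be := by
  simp only [apply_entity_mask_py]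
  simp only [pv_contains_pix, pv_inner, List.nil_append]
  rw [pv_A_outer (fun q => (pvPixList bp).contains q)
    (fun pos v => v.filter (fun nc => !(pvPixList bp).contains nc.1 && !be.contains (pos, nc.1)))
    ba [] h (by simp), List.nil_append, pvNF]

-- ===== VERDICT (by name: the statement is the Claim_ definition above) =====
theorem apply_entity_mask_py_spec : Claim_equal_apply_entity_mask_py := by
  intro ba bp be _ hpre
  unfold Spec_apply_entity_mask_py
  rw [pv_A_eq ba bp be hpre, pv_B_eq ba bp be hpre]
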